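-- pv_equiv track=rewrite | github.com/kdk745/Projects | CS313E/Spiral2.py | makeperimeter
-- ===== SOURCE A (Python) =====
-- def makeperimeter(dim):
--   spiral = []
--   # makes first row and copies it to all rows
--   for i in range (dim):    # 0 - 4
--     lyst = []
--     for j in range ((dim**2) - (dim-1), (dim**2 + 1)):
--       lyst.append(j)
--     spiral.append(lyst)
--
--   # makes first column
--   for k in range (len(spiral)):
--     l = spiral[0][0] - k
--     spiral[k][0] = l
--
--   # makes bottom row
--   for m in range (len(spiral)):  # 0 - 5
--     n = spiral[-1][0] - m
--     spiral[-1][m] = n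
--
--   # makes last column
--   for o in range (1, len(spiral)):
--     p = spiral[-1][-1] - o + 1
--     spiral[-o][-1] = p
--
--   return (spiral)
-- ===== SOURCE B (Python) =====
-- def makeperimeter(dim):
--   # closed-form value per cell, built in one nested comprehension
--   base = dim * dim - dim + 1
--   def cell(i, j):
--     if i == dim - 1:
--       return dim * dim - 2 * dim + 2 - j
--     if j == 0 and i >= 1:
--       return base - i
--     if j == dim - 1 and i >= 1:
--       return dim * dim - 4 * dim + 4 + i
--     return base + j
--   return [[cell(i, j) for j in range(dim)] for i in range(dim)]
-- ===== Notes on version B (the rewrite author's own statement) =====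
-- stated objective: simpler
-- what changed: Replaces the fill-then-overwrite-four-edges mutation sequence with a closed-form per-cell formula emitted by one nested comprehension.
import Mathlib
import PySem

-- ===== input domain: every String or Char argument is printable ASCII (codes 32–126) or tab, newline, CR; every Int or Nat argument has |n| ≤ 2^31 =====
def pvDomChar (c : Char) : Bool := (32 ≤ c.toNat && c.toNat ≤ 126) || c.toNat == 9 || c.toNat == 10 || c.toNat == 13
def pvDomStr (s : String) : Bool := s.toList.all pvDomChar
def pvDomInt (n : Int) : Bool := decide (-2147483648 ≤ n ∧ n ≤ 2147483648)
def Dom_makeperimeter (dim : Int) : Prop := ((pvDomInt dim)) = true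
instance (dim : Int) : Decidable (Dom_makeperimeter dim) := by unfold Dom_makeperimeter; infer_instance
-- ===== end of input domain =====

-- B replaces A's fill-then-overwrite-four-edges mutation sequence with a closed-form
-- per-cell formula emitted in one nested pass (objective: simpler).

-- ===== PORT A =====
-- Python list assignment xs[i] = v (possibly negative index); the fallback branch is
-- never reached by A's loops (every assigned index is in range whenever a loop runs).
def pySetAt {α : Type} (xs : List α) (i : Int) (v : α) : List α :=
  match PySem.List.pyIdx? xs.length i with
  | some k => xs.set k v
  | none => xs

-- reads xs[i]; the defaults are never reached by A's loops (index always in range).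
def pyGetRow (sp : List (List Int)) (i : Int) : List Int := (PySem.List.pyGet? sp i).getD []
def pyGetCell (r : List Int) (j : Int) : Int := (PySem.List.pyGet? r j).getD 0

-- Python's  spiral[i][j] = v  (read the row object, mutate it in place).
def pySetCell (sp : List (List Int)) (i j : Int) (v : Int) : List (List Int) :=
  pySetAt sp i (pySetAt (pyGetRow sp i) j v)

def makeperimeter (dim : Int) : List (List Int) :=
  -- makes first row and copies it to all rows
  let spiral : List (List Int) :=
    (PySem.List.pyRange 0 dim).foldl (fun spiral _i =>
      let lyst : List Int :=
        (PySem.List.pyRange (dim ^ 2 - (dim - 1)) (dim ^ 2 + 1)).foldl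
          (fun lyst j => lyst ++ [j]) []
      spiral ++ [lyst]) []
  -- makes first column
  let spiral :=
    (PySem.List.pyRange 0 (PySem.List.len spiral)).foldl (fun sp k =>
      let l := pyGetCell (pyGetRow sp 0) 0 - k
      pySetCell sp k 0 l) spiral
  -- makes bottom row
  let spiral :=
    (PySem.List.pyRange 0 (PySem.List.len spiral)).foldl (fun sp m =>
      let n := pyGetCell (pyGetRow sp (-1)) 0 - m
      pySetCell sp (-1) m n) spiral
  -- makes last column
  let spiral :=
    (PySem.List.pyRange 1 (PySem.List.len spiral)).foldl (fun sp o =>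
      let p := pyGetCell (pyGetRow sp (-1)) (-1) - o + 1
      pySetCell sp (-o) (-1) p) spiral
  spiral

-- ===== PORT B =====
def makeperimeter_alt (dim : Int) : List (List Int) :=
  let base := dim * dim - dim + 1
  let cell : Int → Int → Int := fun i j =>
    if i = dim - 1 then dim * dim - 2 * dim + 2 - j
    else if j = 0 ∧ 1 ≤ i then base - i
    else if j = dim - 1 ∧ 1 ≤ i then dim * dim - 4 * dim + 4 + i
    else base + j
  (PySem.List.pyRange 0 dim).map (fun i => (PySem.List.pyRange 0 dim).map (fun j => cell i j))

-- ===== PRECONDITION & SPEC =====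
def Spec_makeperimeter (dim : Int) (out : List (List Int)) : Prop := out = makeperimeter_alt dim
instance (dim : Int) (out : List (List Int)) : Decidable (Spec_makeperimeter dim out) := by unfold Spec_makeperimeter; infer_instance

-- ===== CLAIM (what is proved, stated in full; the proofs are below) =====
def Claim_equal_makeperimeter : Prop := ∀ (dim : Int), Dom_makeperimeter dim → Spec_makeperimeter dim (makeperimeter dim)

-- ===== LEMMAS AND PROOFS =====

-- an n×n matrix given by a cell function
def pvMat (n : ℕ) (f : ℕ → ℕ → Int) : List (List Int) :=
  (List.range n).map (fun i => (List.range n).map (f i))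

-- the matrix after A's second loop has filled the first column down to row k (exclusive)
def pvF2 (n k i j : ℕ) : Int :=
  if j = 0 ∧ i < k then (n:Int)^2 - ((n:Int)-1) - i else (n:Int)^2 - ((n:Int)-1) + j

-- after A's third loop has filled the bottom row up to column m (exclusive)
def pvF3 (n m i j : ℕ) : Int :=
  if i = n - 1 ∧ j < m then ((n:Int)^2 - ((n:Int)-1) - ((n:Int)-1)) - j else pvF2 n n i j

-- after A's fourth loop has filled the last column for o = 1..t
def pvF4 (n t i j : ℕ) : Int :=
  if j = n - 1 ∧ n ≤ i + t then ((n:Int)^2 - ((n:Int)-1) - 2*((n:Int)-1)) - ((n:Int) - i) + 1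
  else pvF3 n n i j

lemma length_pvMat (n : ℕ) (f : ℕ → ℕ → Int) : (pvMat n f).length = n := by
  simp [pvMat]

lemma pvMat_congr (n : ℕ) (f g : ℕ → ℕ → Int)
    (h : ∀ i < n, ∀ j < n, f i j = g i j) : pvMat n f = pvMat n g := by
  unfold pvMat
  refine List.map_congr_left ?_
  intro i hi
  refine List.map_congr_left ?_
  intro j hj
  exact h i (List.mem_range.mp hi) j (List.mem_range.mp hj)

lemma pyIdx?_nonneg (n k : ℕ) (h : k < n) : PySem.List.pyIdx? n (k : Int) = some k := by
  simp [PySem.List.pyIdx?, h]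

lemma pyIdx?_neg (n m : ℕ) (h1 : 1 ≤ m) (h2 : m ≤ n) :
    PySem.List.pyIdx? n (-(m : Int)) = some (n - m) := by
  have hm : ¬ (0:Int) ≤ -(m:Int) := by omega
  have hm' : -(n:Int) ≤ -(m:Int) := by omega
  simp only [PySem.List.pyIdx?, if_neg hm, if_pos hm', neg_neg, Int.toNat_natCast]

lemma pyGetRow_pvMat (n : ℕ) (f : ℕ → ℕ → Int) (i : Int) (a : ℕ)
    (ha : PySem.List.pyIdx? n i = some a) (ha' : a < n) :
    pyGetRow (pvMat n f) i = (List.range n).map (f a) := by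
  simp [pyGetRow, PySem.List.pyGet?, ha, pvMat, List.getElem?_map, ha']

lemma pyGetCell_row (n : ℕ) (g : ℕ → Int) (j : Int) (b : ℕ)
    (hb : PySem.List.pyIdx? n j = some b) (hb' : b < n) :
    pyGetCell ((List.range n).map g) j = g b := by
  simp [pyGetCell, PySem.List.pyGet?, hb, List.getElem?_map, hb']

lemma set_map_range (n b : ℕ) (g : ℕ → Int) (v : Int) :
    ((List.range n).map g).set b v = (List.range n).map (fun y => if y = b then v else g y) := by
  apply List.ext_getElem
  · simp
  · intro y hy hy'
    simp only [List.getElem_set, List.getElem_map, List.getElem_range]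
    split_ifs with h h' h' <;> first | rfl | omega

lemma pySetCell_pvMat (n : ℕ) (f : ℕ → ℕ → Int) (i j : Int) (a b : ℕ)
    (ha : PySem.List.pyIdx? n i = some a) (ha' : a < n)
    (hb : PySem.List.pyIdx? n j = some b) (hb' : b < n) (v : Int) :
    pySetCell (pvMat n f) i j v =
      pvMat n (fun x y => if x = a ∧ y = b then v else f x y) := by
  unfold pySetCell
  rw [pyGetRow_pvMat n f i a ha ha']
  simp only [pySetAt, List.length_map, List.length_range, length_pvMat, ha, hb]
  rw [set_map_range n b (f a) v]
  apply List.ext_getElem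
  · simp [pvMat]
  · intro x h1 h2
    have hxn : x < n := by simpa [pvMat] using h1
    simp only [pvMat, List.getElem_set, List.getElem_map, List.getElem_range]
    split_ifs with hax
    · subst hax
      refine List.map_congr_left ?_
      intro y hy
      by_cases hyb : y = b <;> simp [hyb]
    · refine (List.map_congr_left ?_).symm
      intro y hy
      have hne : ¬ (x = a ∧ y = b) := by tauto
      simp [hne]

-- stage 1: the fill loop produces the constant-rows matrix
lemma pvStage1 (n : ℕ) :
    (PySem.List.pyRange 0 (n:Int)).foldl (fun spiral _i =>
        spiral ++ [(PySem.List.pyRange ((n:Int) ^ 2 - ((n:Int) - 1)) ((n:Int) ^ 2 + 1)).foldl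
          (fun lyst j => lyst ++ [j]) []]) ([] : List (List Int))
      = pvMat n (fun _ j => (n:Int)^2 - ((n:Int)-1) + (j:Int)) := by
  rw [PySem.List.foldl_append_singleton_eq_map
        (f := fun _ : Int => (PySem.List.pyRange ((n:Int) ^ 2 - ((n:Int) - 1)) ((n:Int) ^ 2 + 1)).foldl
          (fun lyst j => lyst ++ [j]) [])]
  simp only [PySem.List.foldl_append_singleton_eq_self, List.nil_append]
  rw [PySem.List.pyRange_one, PySem.List.pyRange_one]
  have e1 : ((n:Int) - 0).toNat = n := by omega
  have e2 : ((n:Int)^2 + 1 - ((n:Int)^2 - ((n:Int) - 1))).toNat = n := by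
    have h : (n:Int)^2 + 1 - ((n:Int)^2 - ((n:Int) - 1)) = (n:Int) := by ring
    rw [h]; omega
  rw [e1, e2]
  unfold pvMat
  simp only [List.map_map, Function.comp_def, zero_add]

-- loop 2 (first column), processed rows 0..k-1
lemma pvLoop2 (n : ℕ) (hn : 0 < n) : ∀ (m k : ℕ), k + m = n →
    (List.range' k m).foldl
        (fun sp (x : ℕ) => pySetCell sp (x:Int) 0 (pyGetCell (pyGetRow sp 0) 0 - (x:Int)))
        (pvMat n (pvF2 n k))
      = pvMat n (pvF2 n n) := by
  intro m
  induction m with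
  | zero =>
      intro k hk
      have : k = n := by omega
      subst this
      rfl
  | succ m ih =>
      intro k hk
      rw [List.range'_succ]
      simp only [List.foldl_cons]
      have h0 : PySem.List.pyIdx? n 0 = some 0 := by
        simpa using pyIdx?_nonneg n 0 hn
      have hk' : PySem.List.pyIdx? n ((k:Int)) = some k := pyIdx?_nonneg n k (by omega)
      rw [pyGetRow_pvMat n (pvF2 n k) 0 0 h0 hn, pyGetCell_row n (pvF2 n k 0) 0 0 h0 hn,
        pySetCell_pvMat n (pvF2 n k) (k:Int) 0 k 0 hk' (by omega) h0 hn]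
      have hstep : pvMat n (fun x y => if x = k ∧ y = 0 then pvF2 n k 0 0 - (k:Int) else pvF2 n k x y)
          = pvMat n (pvF2 n (k+1)) := by
        apply pvMat_congr
        intro i hi j hj
        simp only [pvF2, true_and]
        generalize (n:Int) ^ 2 - ((n:Int) - 1) = B
        split_ifs <;> push_cast <;> omega
      rw [hstep]
      exact ih (k+1) (by omega)

-- loop 3 (bottom row), processed columns 0..k-1
lemma pvLoop3 (n : ℕ) (hn : 0 < n) : ∀ (m k : ℕ), k + m = n →
    (List.range' k m).foldl
        (fun sp (x : ℕ) => pySetCell sp (-1) (x:Int) (pyGetCell (pyGetRow sp (-1)) 0 - (x:Int)))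
        (pvMat n (pvF3 n k))
      = pvMat n (pvF3 n n) := by
  intro m
  induction m with
  | zero =>
      intro k hk
      have : k = n := by omega
      subst this
      rfl
  | succ m ih =>
      intro k hk
      rw [List.range'_succ]
      simp only [List.foldl_cons]
      have h0 : PySem.List.pyIdx? n 0 = some 0 := by
        simpa using pyIdx?_nonneg n 0 hn
      have hneg : PySem.List.pyIdx? n (-1) = some (n-1) := by
        simpa using pyIdx?_neg n 1 le_rfl hn
      have hk' : PySem.List.pyIdx? n ((k:Int)) = some k := pyIdx?_nonneg n k (by omega)
      rw [pyGetRow_pvMat n (pvF3 n k) (-1) (n-1) hneg (by omega),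
        pyGetCell_row n (pvF3 n k (n-1)) 0 0 h0 hn,
        pySetCell_pvMat n (pvF3 n k) (-1) (k:Int) (n-1) k hneg (by omega) hk' (by omega)]
      have hstep : pvMat n (fun x y => if x = n-1 ∧ y = k then pvF3 n k (n-1) 0 - (k:Int) else pvF3 n k x y)
          = pvMat n (pvF3 n (k+1)) := by
        apply pvMat_congr
        intro i hi j hj
        simp only [pvF3, pvF2, true_and]
        generalize (n:Int) ^ 2 - ((n:Int) - 1) = B
        split_ifs <;> push_cast <;> omega
      rw [hstep]
      exact ih (k+1) (by omega)

-- loop 4 (last column), processed o = 1..t; iterates n-1 times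
lemma pvLoop4 (n : ℕ) (hn : 0 < n) : ∀ (m t : ℕ), t + m = n - 1 →
    (List.range' t m).foldl
        (fun sp (x : ℕ) => pySetCell sp (-(1 + (x:Int))) (-1)
          (pyGetCell (pyGetRow sp (-1)) (-1) - (1 + (x:Int)) + 1))
        (pvMat n (pvF4 n t))
      = pvMat n (pvF4 n (n-1)) := by
  intro m
  induction m with
  | zero =>
      intro t ht
      have : t = n - 1 := by omega
      subst this
      rfl
  | succ m ih =>
      intro t ht
      rw [List.range'_succ]
      simp only [List.foldl_cons]
      have hneg : PySem.List.pyIdx? n (-1) = some (n-1) := by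
        simpa using pyIdx?_neg n 1 le_rfl hn
      have hrow : PySem.List.pyIdx? n (-(1 + (t:Int))) = some (n - (1+t)) := by
        have h := pyIdx?_neg n (1+t) (by omega) (by omega)
        push_cast at h
        exact h
      rw [pyGetRow_pvMat n (pvF4 n t) (-1) (n-1) hneg (by omega),
        pyGetCell_row n (pvF4 n t (n-1)) (-1) (n-1) hneg (by omega),
        pySetCell_pvMat n (pvF4 n t) (-(1 + (t:Int))) (-1) (n-(1+t)) (n-1) hrow (by omega) hneg (by omega)]
      have hstep : pvMat n (fun x y => if x = n-(1+t) ∧ y = n-1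
            then pvF4 n t (n-1) (n-1) - (1 + (t:Int)) + 1 else pvF4 n t x y)
          = pvMat n (pvF4 n (t+1)) := by
        apply pvMat_congr
        intro i hi j hj
        simp only [pvF4, pvF3, pvF2, true_and]
        generalize (n:Int) ^ 2 - ((n:Int) - 1) = B
        split_ifs <;> omega
      rw [hstep]
      exact ih (t+1) (by omega)

lemma pvLen (n : ℕ) (f : ℕ → ℕ → Int) : PySem.List.len (pvMat n f) = (n:Int) := by
  simp [PySem.List.len, length_pvMat]

-- A's whole computation, for a positive dimension
lemma pvA_eq (n : ℕ) (hn : 0 < n) :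
    makeperimeter (n:Int) = pvMat n (pvF4 n (n-1)) := by
  simp only [makeperimeter]
  rw [pvStage1 n]
  have hinit2 : pvMat n (fun _ j => (n:Int)^2 - ((n:Int)-1) + (j:Int)) = pvMat n (pvF2 n 0) := by
    apply pvMat_congr; intro i hi j hj; simp [pvF2]
  rw [hinit2, pvLen, PySem.List.pyRange_one]
  have e1 : ((n:Int) - 0).toNat = n := by omega
  rw [e1, List.foldl_map, List.range_eq_range']
  simp only [zero_add]
  rw [pvLoop2 n hn n 0 (by omega)]
  have hinit3 : pvMat n (pvF2 n n) = pvMat n (pvF3 n 0) := by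
    apply pvMat_congr; intro i hi j hj; simp [pvF3]
  rw [hinit3, pvLen, PySem.List.pyRange_one, e1, List.foldl_map, List.range_eq_range']
  simp only [zero_add]
  rw [pvLoop3 n hn n 0 (by omega)]
  have hinit4 : pvMat n (pvF3 n n) = pvMat n (pvF4 n 0) := by
    apply pvMat_congr; intro i hi j hj
    simp only [pvF4]
    rw [if_neg (by omega)]
  rw [hinit4, pvLen, PySem.List.pyRange_one]
  have e2 : ((n:Int) - 1).toNat = n - 1 := by omega
  rw [e2, List.foldl_map, List.range_eq_range']
  exact pvLoop4 n hn (n-1) 0 (by omega)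

-- B's computation as a pvMat
lemma pvAlt_eq (n : ℕ) :
    makeperimeter_alt (n:Int) = pvMat n (fun i j =>
      if (i:Int) = (n:Int) - 1 then (n:Int)*(n:Int) - 2*(n:Int) + 2 - (j:Int)
      else if (j:Int) = 0 ∧ 1 ≤ (i:Int) then (n:Int)*(n:Int) - (n:Int) + 1 - (i:Int)
      else if (j:Int) = (n:Int) - 1 ∧ 1 ≤ (i:Int) then (n:Int)*(n:Int) - 4*(n:Int) + 4 + (i:Int)
      else (n:Int)*(n:Int) - (n:Int) + 1 + (j:Int)) := by
  simp only [makeperimeter_alt]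
  rw [PySem.List.pyRange_one]
  have e1 : ((n:Int) - 0).toNat = n := by omega
  rw [e1]
  unfold pvMat
  simp only [List.map_map, Function.comp_def, zero_add]

-- ===== VERDICT (by name: the statement is the Claim_ definition above) =====
theorem makeperimeter_spec : Claim_equal_makeperimeter := by
  intro dim _
  unfold Spec_makeperimeter
  by_cases hpos : 0 < dim
  · have hd : dim = (dim.toNat : Int) := by omega
    rw [hd, pvA_eq dim.toNat (by omega), pvAlt_eq dim.toNat]
    apply pvMat_congr
    intro i hi j hj
    simp only [pvF4, pvF3, pvF2, pow_two]
    generalize (dim.toNat : Int) * (dim.toNat : Int) = M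
    split_ifs <;> omega
  · have h0 : PySem.List.pyRange 0 dim = [] := by
      have hy : (dim - 0).toNat = 0 := by omega
      rw [PySem.List.pyRange_one, hy]
      rfl
    have h00 : PySem.List.pyRange 0 (0:Int) = [] := by decide
    have h10 : PySem.List.pyRange 1 (0:Int) = [] := by decide
    simp [makeperimeter, makeperimeter_alt, h0, PySem.List.len, h00, h10]
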